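-- pv_equiv track=rewrite | github.com/leesk212/dannys-coding-ai-agent-final | query_sessions/20260409_161557/pms_backend/business_logic/specifications.py | get_previous_status
-- ===== SOURCE A (Python) =====
-- from typing import Optional, List, Set, Dict, Any
--
-- class BusinessRule:
--     """
--     Container for all business rules and constants.
--
--     This class centralizes all business logic constants and rules
--     for easy maintenance and testing.
--     """
--
--     # Token Configuration
--     JWT_ACCESS_TOKEN_EXPIRE_MINUTES: int = 60 * 24  # 24 hours
--     JWT_REFRESH_TOKEN_EXPIRE_DAYS: int = 7
--
--     # Password Requirements
--     MIN_PASSWORD_LENGTH: int = 8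
--     PASSWORD_MIN_UPPERCASE: int = 1
--     PASSWORD_MIN_DIGIT: int = 1
--
--     # Pagination Defaults
--     DEFAULT_PAGE_SIZE: int = 20
--     MAX_PAGE_SIZE: int = 100
--     MIN_PAGE_SIZE: int = 1
--
--     # Date Validation
--     MAX_PROJECT_DURATION_DAYS: int = 3650  # 10 years
--     MIN_DATE_FUTURE: int = 365 * 10  # 10 years in future
--
--     # Rate Limiting
--     LOGIN_ATTEMPTS_LIMIT: int = 5
--     LOGIN_ATTEMPTS_WINDOW_SECONDS: int = 300  # 5 minutes
--
--     # Project Status Transitions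
--     VALID_STATUS_TRANSITIONS: Dict[str, Set[str]] = {
--         'planning': {'in_progress', 'cancelled'},
--         'in_progress': {'on_hold', 'completed', 'cancelled'},
--         'on_hold': {'in_progress', 'completed', 'cancelled'},
--         'completed': set(),  # Terminal state
--         'cancelled': set(),  # Terminal state
--     }
--
--     # Task Status Transitions
--     VALID_TASK_TRANSITIONS: Dict[str, Set[str]] = {
--         'todo': {'in_progress', 'cancelled'},
--         'in_progress': {'blocked', 'completed', 'cancelled'},
--         'blocked': {'in_progress', 'cancelled'},
--         'completed': set(),  # Terminal state
--         'cancelled': set(),  # Terminal state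
--     }
--
-- def get_previous_status(
--     current_status: str
-- ) -> Optional[str]:
--     """
--     Find the most likely previous status.
--
--     Args:
--         current_status: Current status
--
--     Returns:
--         Likely previous status or None
--     """
--     # Reverse mapping of transitions
--     reverse_map: Dict[str, str] = {}
--     for from_status, to_statuses in BusinessRule.VALID_TASK_TRANSITIONS.items():
--         for to_status in to_statuses:
--             if to_status not in reverse_map:
--                 reverse_map[to_status] = from_status
--
--     return reverse_map.get(current_status)
-- ===== SOURCE B (Python) =====
-- def get_previous_status(current_status):
--     """
--     Find the most likely previous status.
--
--     Single early-returning scan over VALID_TASK_TRANSITIONS: the first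
--     from_status (in dict insertion order) whose successor set contains
--     current_status is the answer; no reverse index is built.
--     """
--     for from_status, to_statuses in BusinessRule.VALID_TASK_TRANSITIONS.items():
--         if current_status in to_statuses:
--             return from_status
--     return None
--
--
-- class BusinessRule:
--     VALID_TASK_TRANSITIONS = {
--         'todo': {'in_progress', 'cancelled'},
--         'in_progress': {'blocked', 'completed', 'cancelled'},
--         'blocked': {'in_progress', 'cancelled'},
--         'completed': set(),
--         'cancelled': set(),
--     }
-- ===== Notes on version B (the rewrite author's own statement) =====
-- stated objective: simpler
-- what changed: B drops A's reverse-map-building pass and dict lookup; it scans VALID_TASK_TRANSITIONS once and returns the first from_status whose successor set contains current_status (same first-in-insertion-order winner), else None.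
import Mathlib
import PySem

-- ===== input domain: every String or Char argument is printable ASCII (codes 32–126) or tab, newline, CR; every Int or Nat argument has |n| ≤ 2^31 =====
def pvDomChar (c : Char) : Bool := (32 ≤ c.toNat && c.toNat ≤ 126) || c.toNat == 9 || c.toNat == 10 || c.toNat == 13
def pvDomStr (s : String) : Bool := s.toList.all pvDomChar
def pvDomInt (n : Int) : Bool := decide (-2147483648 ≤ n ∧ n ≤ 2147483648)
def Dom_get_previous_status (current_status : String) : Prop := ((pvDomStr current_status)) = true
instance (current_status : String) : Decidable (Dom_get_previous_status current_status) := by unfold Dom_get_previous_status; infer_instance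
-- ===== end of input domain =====

-- B replaces A's reverse-index-building pass + lookup by a single early-exit scan of the
-- transition table (simpler); return values are identical for every string.

-- BusinessRule.VALID_TASK_TRANSITIONS: insertion-ordered dict of status -> successor set.
-- (Python set iteration order is hash-based; the result of both programs is independent of
-- the order inside each successor set, since the winning from_status per target is the
-- first dict entry, so a fixed literal order is a faithful port.)
def pvValidTaskTransitions : PySem.Dict String (PySem.Set String) := PySem.Dict.mk
  [ ("todo", ["in_progress", "cancelled"])
  , ("in_progress", ["blocked", "completed", "cancelled"])
  , ("blocked", ["in_progress", "cancelled"])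
  , ("completed", [])
  , ("cancelled", []) ]

-- ===== PORT A =====
def get_previous_status (current_status : String) : Option String :=
  let reverse_map : PySem.Dict String String :=
    pvValidTaskTransitions.items.foldl
      (fun rm p =>
        p.2.foldl
          (fun rm to_status =>
            if ¬ rm.contains to_status then rm.insert to_status p.1 else rm)
          rm)
      PySem.Dict.empty
  reverse_map.get? current_status

-- ===== PORT B =====
def pvScanPrev (current_status : String) : List (String × PySem.Set String) → Option String
  | [] => none
  | (from_status, to_statuses) :: rest =>
      if to_statuses.contains current_status then some from_status
      else pvScanPrev current_status rest

def get_previous_status_alt (current_status : String) : Option String :=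
  pvScanPrev current_status pvValidTaskTransitions.items

-- ===== PRECONDITION & SPEC =====
def Spec_get_previous_status (current_status : String) (out : Option String) : Prop := out = get_previous_status_alt current_status
instance (current_status : String) (out : Option String) : Decidable (Spec_get_previous_status current_status out) := by unfold Spec_get_previous_status; infer_instance

-- ===== CLAIM (what is proved, stated in full; the proofs are below) =====
def Claim_equal_get_previous_status : Prop := ∀ (current_status : String), Dom_get_previous_status current_status → Spec_get_previous_status current_status (get_previous_status current_status)

-- ===== LEMMAS AND PROOFS =====

-- ===== VERDICT (by name: the statement is the Claim_ definition above) =====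
theorem get_previous_status_spec : Claim_equal_get_previous_status := by
  intro s _
  unfold Spec_get_previous_status get_previous_status get_previous_status_alt
  simp [pvValidTaskTransitions, pvScanPrev, List.foldl, PySem.Dict.empty, PySem.Dict.contains, PySem.Dict.insert,
        PySem.Dict.get?]
  by_cases h1 : s = "in_progress" <;> by_cases h2 : s = "cancelled" <;>
    by_cases h3 : s = "blocked" <;> by_cases h4 : s = "completed" <;>
    (try simp_all); exact ⟨fun h => h1 h.symm, fun h => h2 h.symm, fun h => h3 h.symm, fun h => h4 h.symm⟩
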